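-- pv_equiv track=rewrite | github.com/edouardmulliez/adventofcode | 2019/aoc_2019/day22/day22.py | update_params_for_repeated_cycles
-- ===== SOURCE A (Python) =====
-- def update_params_for_repeated_cycles(multiplier, constant, nb_cards, times):
--     if times == 1:
--         final_multiplier = multiplier
--         final_constant = constant
--     elif times % 2 == 0:
--         m, c = update_params_for_repeated_cycles(multiplier, constant, nb_cards, times // 2)
--         final_multiplier = m ** 2
--         final_constant = (m + 1) * c
--     else:
--         m, c = update_params_for_repeated_cycles(multiplier, constant, nb_cards, times - 1)
--         final_multiplier = m * multiplier
--         final_constant = multiplier * c + constant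
--     final_multiplier = final_multiplier % nb_cards
--     final_constant = final_constant % nb_cards
--     return final_multiplier, final_constant
-- ===== SOURCE B (Python) =====
-- def update_params_for_repeated_cycles(multiplier, constant, nb_cards, times):
--     # Iterative exponentiation-by-squaring over the bits of `times`:
--     # accumulator map (rm, rc) starts as the identity, base map (bm, bc)
--     # is repeatedly doubled; a set low bit composes the base into the accumulator.
--     rm, rc = 1, 0
--     bm, bc = multiplier, constant
--     t = times
--     while t > 0:
--         if t % 2 == 1:
--             rm, rc = rm * bm % nb_cards, (rm * bc + rc) % nb_cards
--         bm, bc = bm * bm % nb_cards, (bm + 1) * bc % nb_cards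
--         t //= 2
--     return rm % nb_cards, rc % nb_cards
-- ===== Notes on version B (the rewrite author's own statement) =====
-- stated objective: alternative
-- what changed: Replaced A's top-down divide-and-conquer recursion (halve if even, peel one application if odd) with a bottom-up iterative square-and-multiply loop over the bits of times, maintaining an accumulator affine map and a repeatedly doubled base map.
import Mathlib
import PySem

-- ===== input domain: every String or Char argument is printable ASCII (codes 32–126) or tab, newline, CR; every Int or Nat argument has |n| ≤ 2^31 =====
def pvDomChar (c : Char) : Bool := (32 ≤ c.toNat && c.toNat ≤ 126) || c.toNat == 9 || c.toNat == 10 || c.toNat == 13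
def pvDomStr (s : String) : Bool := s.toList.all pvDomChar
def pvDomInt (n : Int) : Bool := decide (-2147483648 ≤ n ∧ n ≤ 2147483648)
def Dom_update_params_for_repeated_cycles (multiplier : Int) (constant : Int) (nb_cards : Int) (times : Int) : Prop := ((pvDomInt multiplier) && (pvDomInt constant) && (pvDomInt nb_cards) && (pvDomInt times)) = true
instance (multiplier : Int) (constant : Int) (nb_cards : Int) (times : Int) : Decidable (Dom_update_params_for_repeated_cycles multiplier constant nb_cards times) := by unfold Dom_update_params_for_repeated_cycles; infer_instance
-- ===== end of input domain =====

-- B re-derives the same affine parameters with an iterative square-and-multiply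
-- loop instead of A's top-down recursion (alternative decomposition, same cost).

-- ===== PORT A =====
-- Literal port of A's recursion. For times ≤ 0 Python recurses forever and
-- raises RecursionError; the first guard only makes the Lean function total
-- there (excluded by Pre_).
def update_params_for_repeated_cycles (multiplier : Int) (constant : Int) (nb_cards : Int) (times : Int) : Int × Int :=
  if times ≤ 0 then (0, 0)  -- Python raises RecursionError here; outside Pre_
  else if times = 1 then
    (PySem.Int.mod multiplier nb_cards, PySem.Int.mod constant nb_cards)
  else if PySem.Int.mod times 2 = 0 then
    let p := update_params_for_repeated_cycles multiplier constant nb_cards (PySem.Int.floordiv times 2)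
    (PySem.Int.mod (p.1 ^ 2) nb_cards, PySem.Int.mod ((p.1 + 1) * p.2) nb_cards)
  else
    let p := update_params_for_repeated_cycles multiplier constant nb_cards (times - 1)
    (PySem.Int.mod (p.1 * multiplier) nb_cards, PySem.Int.mod (multiplier * p.2 + constant) nb_cards)
termination_by times.toNat
decreasing_by
  · rw [PySem.Int.floordiv_eq_ediv_of_pos (by norm_num : (0:Int) < 2)]; omega
  · omega

-- ===== PORT B =====
-- the while-loop of Source B: state (rm, rc, bm, bc, t)
def pvAltLoop (nb_cards : Int) (rm rc bm bc t : Int) : Int × Int :=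
  if 0 < t then
    let s := if PySem.Int.mod t 2 = 1 then
        (PySem.Int.mod (rm * bm) nb_cards, PySem.Int.mod (rm * bc + rc) nb_cards)
      else (rm, rc)
    pvAltLoop nb_cards s.1 s.2 (PySem.Int.mod (bm * bm) nb_cards)
      (PySem.Int.mod ((bm + 1) * bc) nb_cards) (PySem.Int.floordiv t 2)
  else (PySem.Int.mod rm nb_cards, PySem.Int.mod rc nb_cards)
termination_by t.toNat
decreasing_by
  rw [PySem.Int.floordiv_eq_ediv_of_pos (by norm_num : (0:Int) < 2)]; omega

def update_params_for_repeated_cycles_alt (multiplier : Int) (constant : Int) (nb_cards : Int) (times : Int) : Int × Int :=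
  pvAltLoop nb_cards 1 0 multiplier constant times

-- ===== PRECONDITION & SPEC =====
-- Pre_ excludes exactly the inputs where Python A raises: times ≤ 0
-- (RecursionError) and nb_cards = 0 (ZeroDivisionError).
def Pre_update_params_for_repeated_cycles (multiplier : Int) (constant : Int) (nb_cards : Int) (times : Int) : Prop :=
  1 ≤ times ∧ nb_cards ≠ 0
instance (multiplier : Int) (constant : Int) (nb_cards : Int) (times : Int) : Decidable (Pre_update_params_for_repeated_cycles multiplier constant nb_cards times) := by unfold Pre_update_params_for_repeated_cycles; infer_instance

def pvWitness_update_params_for_repeated_cycles : Int × Int × Int × Int := (7, 3, 10, 6)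

def Spec_update_params_for_repeated_cycles (multiplier : Int) (constant : Int) (nb_cards : Int) (times : Int) (out : Int × Int) : Prop := out = update_params_for_repeated_cycles_alt multiplier constant nb_cards times
instance (multiplier : Int) (constant : Int) (nb_cards : Int) (times : Int) (out : Int × Int) : Decidable (Spec_update_params_for_repeated_cycles multiplier constant nb_cards times out) := by unfold Spec_update_params_for_repeated_cycles; infer_instance

-- ===== CLAIM (what is proved, stated in full; the proofs are below) =====
def Claim_equal_update_params_for_repeated_cycles : Prop := ∀ (multiplier : Int) (constant : Int) (nb_cards : Int) (times : Int), Dom_update_params_for_repeated_cycles multiplier constant nb_cards times → Pre_update_params_for_repeated_cycles multiplier constant nb_cards times → Spec_update_params_for_repeated_cycles multiplier constant nb_cards times (update_params_for_repeated_cycles multiplier constant nb_cards times)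


-- ===== LEMMAS AND PROOFS =====

-- geometric sum 1 + m + … + m^(n-1)
def pvGeom (m : Int) : Nat → Int
  | 0 => 0
  | n + 1 => pvGeom m n + m ^ n

theorem pvGeom_add (m : Int) (e s : Nat) :
    pvGeom m (e + s) = pvGeom m e + m ^ e * pvGeom m s := by
  induction s with
  | zero => simp [pvGeom]
  | succ s ih =>
      rw [show e + (s + 1) = (e + s) + 1 from rfl, pvGeom, ih, pvGeom, pow_add]; ring

theorem pvGeom_succ' (m : Int) (n : Nat) : pvGeom m (n + 1) = m * pvGeom m n + 1 := by
  rw [show n + 1 = 1 + n by omega, pvGeom_add]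
  simp [pvGeom]
  ring

theorem pymod_congr {n a b : Int} (h : Int.ModEq n a b) :
    PySem.Int.mod a n = PySem.Int.mod b n := by
  have h' : a % n = b % n := h
  have hd : n ∣ a ↔ n ∣ b := by
    rw [Int.dvd_iff_emod_eq_zero, Int.dvd_iff_emod_eq_zero, h']
  simp only [PySem.Int.mod, Int.fmod_eq_emod, h', hd]

theorem pymod_modeq (a n : Int) : Int.ModEq n (PySem.Int.mod a n) a := by
  unfold Int.ModEq PySem.Int.mod
  rw [Int.fmod_def]
  simp [Int.sub_emod, Int.mul_emod_right]

-- A computes the modded exact power and geometric-sum constant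
theorem A_exact (m c nb : Int) : ∀ n : Nat, 1 ≤ n →
    update_params_for_repeated_cycles m c nb (n : Int) =
      (PySem.Int.mod (m ^ n) nb, PySem.Int.mod (c * pvGeom m n) nb) := by
  intro n
  induction n using Nat.strong_induction_on with
  | _ n ih =>
    intro hn
    rw [update_params_for_repeated_cycles]
    by_cases h1 : n = 1
    · subst h1
      norm_num [pvGeom]
    · have h2 : 2 ≤ n := by omega
      have hle : ¬ ((n : Int) ≤ 0) := by omega
      have hne : ¬ ((n : Int) = 1) := by omega
      simp only [hle, hne, if_false]
      rw [show ((2 : Int)) = ((2 : Nat) : Int) from rfl, PySem.Int.mod_natCast,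
        PySem.Int.floordiv_natCast]
      by_cases hev : n % 2 = 0
      · have ihh := ih (n / 2) (by omega) (by omega)
        simp only [hev, Nat.cast_zero, if_true, ihh]
        have hmm : Int.ModEq nb ((PySem.Int.mod (m ^ (n / 2)) nb) ^ 2) (m ^ n) := by
          have := (pymod_modeq (m ^ (n / 2)) nb).pow 2
          calc _ ≡ (m ^ (n / 2)) ^ 2 [ZMOD nb] := this
            _ = m ^ (n / 2 + n / 2) := by rw [pow_two, ← pow_add]
            _ = m ^ n := by rw [show n / 2 + n / 2 = n by omega]
        have hcc : Int.ModEq nb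
            ((PySem.Int.mod (m ^ (n / 2)) nb + 1) * PySem.Int.mod (c * pvGeom m (n / 2)) nb)
            (c * pvGeom m n) := by
          have := ((pymod_modeq (m ^ (n / 2)) nb).add_right 1).mul
            (pymod_modeq (c * pvGeom m (n / 2)) nb)
          calc _ ≡ (m ^ (n / 2) + 1) * (c * pvGeom m (n / 2)) [ZMOD nb] := this
            _ = c * pvGeom m (n / 2 + n / 2) := by rw [pvGeom_add]; ring
            _ = c * pvGeom m n := by rw [show n / 2 + n / 2 = n by omega]
        exact Prod.ext (pymod_congr hmm) (pymod_congr hcc)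
      · have ihh := ih (n - 1) (by omega) (by omega)
        have hcast : (n : Int) - 1 = ((n - 1 : Nat) : Int) := by omega
        have hevi : ¬ (((n % 2 : Nat) : Int) = 0) := by omega
        simp only [hevi, if_false, hcast, ihh]
        have hn1 : n = (n - 1) + 1 := by omega
        have hmm : Int.ModEq nb (PySem.Int.mod (m ^ (n - 1)) nb * m) (m ^ n) := by
          have := (pymod_modeq (m ^ (n - 1)) nb).mul_right m
          calc _ ≡ m ^ (n - 1) * m [ZMOD nb] := this
            _ = m ^ n := by rw [← pow_succ, ← hn1]
        have hcc : Int.ModEq nb (m * PySem.Int.mod (c * pvGeom m (n - 1)) nb + c)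
            (c * pvGeom m n) := by
          have := ((pymod_modeq (c * pvGeom m (n - 1)) nb).mul_left m).add_right c
          calc _ ≡ m * (c * pvGeom m (n - 1)) + c [ZMOD nb] := this
            _ = c * pvGeom m n := by
                conv_rhs => rw [hn1, pvGeom_succ']
                ring
        exact Prod.ext (pymod_congr hmm) (pymod_congr hcc)

-- loop invariant for B: accumulator encodes e applications, base encodes s
theorem B_loop (m c nb : Int) : ∀ (t : Nat) (e s : Nat) (rm rc bm bc : Int),
    Int.ModEq nb rm (m ^ e) → Int.ModEq nb rc (c * pvGeom m e) →
    Int.ModEq nb bm (m ^ s) → Int.ModEq nb bc (c * pvGeom m s) →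
    pvAltLoop nb rm rc bm bc (t : Int) =
      (PySem.Int.mod (m ^ (e + s * t)) nb, PySem.Int.mod (c * pvGeom m (e + s * t)) nb) := by
  intro t
  induction t using Nat.strong_induction_on with
  | _ t ih =>
    intro e s rm rc bm bc hrm hrc hbm hbc
    rw [pvAltLoop]
    by_cases ht : 0 < t
    · have htc : (0 : Int) < (t : Int) := by omega
      simp only [htc, if_true]
      rw [show ((2 : Int)) = ((2 : Nat) : Int) from rfl, PySem.Int.mod_natCast,
        PySem.Int.floordiv_natCast]
      have hbm' : Int.ModEq nb (PySem.Int.mod (bm * bm) nb) (m ^ (2 * s)) := by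
        calc _ ≡ bm * bm [ZMOD nb] := pymod_modeq _ _
          _ ≡ m ^ s * m ^ s [ZMOD nb] := hbm.mul hbm
          _ = m ^ (2 * s) := by rw [← pow_add]; congr 1; omega
      have hbc' : Int.ModEq nb (PySem.Int.mod ((bm + 1) * bc) nb) (c * pvGeom m (2 * s)) := by
        calc _ ≡ (bm + 1) * bc [ZMOD nb] := pymod_modeq _ _
          _ ≡ (m ^ s + 1) * (c * pvGeom m s) [ZMOD nb] := (hbm.add_right 1).mul hbc
          _ = c * pvGeom m (2 * s) := by
              rw [show 2 * s = s + s by omega, pvGeom_add]; ring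
      by_cases hodd : t % 2 = 1
      · have hoddc : ((t % 2 : Nat) : Int) = 1 := by omega
        simp only [hoddc, if_true]
        have hrm' : Int.ModEq nb (PySem.Int.mod (rm * bm) nb) (m ^ (e + s)) := by
          calc _ ≡ rm * bm [ZMOD nb] := pymod_modeq _ _
            _ ≡ m ^ e * m ^ s [ZMOD nb] := hrm.mul hbm
            _ = m ^ (e + s) := by rw [pow_add]
        have hrc' : Int.ModEq nb (PySem.Int.mod (rm * bc + rc) nb) (c * pvGeom m (e + s)) := by
          calc _ ≡ rm * bc + rc [ZMOD nb] := pymod_modeq _ _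
            _ ≡ m ^ e * (c * pvGeom m s) + c * pvGeom m e [ZMOD nb] := (hrm.mul hbc).add hrc
            _ = c * pvGeom m (e + s) := by rw [pvGeom_add]; ring
        rw [ih (t / 2) (by omega) (e + s) (2 * s) _ _ _ _ hrm' hrc' hbm' hbc',
          show e + s + 2 * s * (t / 2) = e + s * t by
            have h2 : 2 * (t / 2) + 1 = t := by omega
            calc e + s + 2 * s * (t / 2) = e + s * (2 * (t / 2) + 1) := by ring
              _ = e + s * t := by rw [h2]]
      · have hoddc : ¬ (((t % 2 : Nat) : Int) = 1) := by omega
        simp only [hoddc, if_false]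
        rw [ih (t / 2) (by omega) e (2 * s) _ _ _ _ hrm hrc hbm' hbc',
          show e + 2 * s * (t / 2) = e + s * t by
            have h2 : 2 * (t / 2) = t := by omega
            calc e + 2 * s * (t / 2) = e + s * (2 * (t / 2)) := by ring
              _ = e + s * t := by rw [h2]]
    · have htc : ¬ ((0 : Int) < (t : Int)) := by omega
      have ht0 : t = 0 := by omega
      simp only [ht0, Nat.mul_zero, Nat.add_zero, Nat.cast_zero, lt_self_iff_false, if_false]
      exact Prod.ext (pymod_congr hrm) (pymod_congr hrc)

-- ===== VERDICT (by name: the statement is the Claim_ definition above) =====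
theorem update_params_for_repeated_cycles_spec : Claim_equal_update_params_for_repeated_cycles := by
  intro m c nb t _ hpre
  unfold Spec_update_params_for_repeated_cycles update_params_for_repeated_cycles_alt
  obtain ⟨ht, _⟩ := hpre
  have hcast : t = ((t.toNat : Nat) : Int) := by omega
  rw [hcast, A_exact m c nb t.toNat (by omega),
    B_loop m c nb t.toNat 0 1 1 0 m c (by simp [Int.ModEq]) (by simp [pvGeom, Int.ModEq])
      (by simp [Int.ModEq]) (by simp [pvGeom, Int.ModEq])]
  simp
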